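-- pv_equiv track=rewrite | github.com/SoluMilken/algo_zoo | codejam2020/qual_round/p1.py | get_number_of_repeated_rows
-- ===== SOURCE A (Python) =====
-- def get_number_of_repeated_rows(matrix):
--     dim = len(matrix[0])
--     count = 0
--     for i in range(dim):
--         record = {}
--         for j in range(dim):
--             ele = matrix[i][j]
--             if ele not in record:
--                 record[ele] = ele
--             else:
--                 count += 1
--                 break
--     return count
-- ===== SOURCE B (Python) =====
-- def get_number_of_repeated_rows(matrix):
--     dim = len(matrix[0])
--     count = 0
--     for row in matrix[:dim]:
--         s = sorted(row[:dim])
--         if any(a == b for a, b in zip(s, s[1:])):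
--             count += 1
--     return count
-- ===== Notes on version B (the rewrite author's own statement) =====
-- stated objective: alternative
-- what changed: A detects a repeat per row with a hash dict and an early break over indices; B sorts each row's dim-prefix and counts rows whose sorted prefix has two equal adjacent elements.
import Mathlib
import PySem

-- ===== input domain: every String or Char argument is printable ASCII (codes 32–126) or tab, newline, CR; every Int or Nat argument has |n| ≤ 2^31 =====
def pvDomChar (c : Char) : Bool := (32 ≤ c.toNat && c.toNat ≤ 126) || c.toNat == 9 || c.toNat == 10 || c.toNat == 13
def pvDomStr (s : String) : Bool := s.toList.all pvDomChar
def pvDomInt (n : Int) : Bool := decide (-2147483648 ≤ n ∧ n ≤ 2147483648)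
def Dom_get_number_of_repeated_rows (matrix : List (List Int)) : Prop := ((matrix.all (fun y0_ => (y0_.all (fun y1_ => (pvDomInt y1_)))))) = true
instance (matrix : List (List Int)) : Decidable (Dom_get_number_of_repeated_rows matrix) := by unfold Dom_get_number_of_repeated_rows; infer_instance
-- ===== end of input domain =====

-- B replaces A's per-row hash-dict-with-break repeat detection by sorting each row's
-- dim-prefix and testing for an equal adjacent pair (objective: alternative algorithm).

-- ===== PORT A =====
-- inner 'for j in range(dim)' loop with its break; returns the increment (1 on break, else 0).
-- row[j] is only reached in range under Pre_, so the getD default is never the value used.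
def pvA_inner (row : List Int) (dim j : Nat) (record : PySem.Dict Int Int) : Int :=
  if j < dim then
    let ele := row.getD j 0
    if record.contains ele = false then
      pvA_inner row dim (j + 1) (record.insert ele ele)
    else 1
  else 0
termination_by dim - j

def get_number_of_repeated_rows (matrix : List (List Int)) : Int :=
  let dim := (matrix.headD []).length
  (List.range dim).foldl
    (fun count i => count + pvA_inner (matrix.getD i []) dim 0 PySem.Dict.empty) 0

-- ===== PORT B =====
-- any(a == b for a, b in zip(s, s[1:]))
def pvHasAdjDup (s : List Int) : Bool := (s.zip s.tail).any (fun p => p.1 == p.2)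

def get_number_of_repeated_rows_alt (matrix : List (List Int)) : Int :=
  let dim := (matrix.headD []).length
  (PySem.List.slice matrix none (some (dim : Int))).foldl
    (fun count row =>
      let s := PySem.List.sorted (PySem.List.slice row none (some (dim : Int))) (fun x => x) false
      if pvHasAdjDup s then count + 1 else count) 0

-- ===== PRECONDITION & SPEC =====
-- Pre_ is exactly where A returns: matrix nonempty, at least dim = len(matrix[0]) rows, and
-- each of the first dim rows either has ≥ dim elements or hits a duplicate before running out.
def Pre_get_number_of_repeated_rows (matrix : List (List Int)) : Prop :=
  matrix ≠ [] ∧ (matrix.headD []).length ≤ matrix.length ∧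
    ∀ row ∈ matrix.take (matrix.headD []).length,
      (matrix.headD []).length ≤ row.length ∨ ¬ (row.take (matrix.headD []).length).Nodup
instance (matrix : List (List Int)) : Decidable (Pre_get_number_of_repeated_rows matrix) := by
  unfold Pre_get_number_of_repeated_rows; infer_instance

def pvWitness_get_number_of_repeated_rows : List (List Int) := [[1, 2], [2, 2]]

def Spec_get_number_of_repeated_rows (matrix : List (List Int)) (out : Int) : Prop := out = get_number_of_repeated_rows_alt matrix
instance (matrix : List (List Int)) (out : Int) : Decidable (Spec_get_number_of_repeated_rows matrix out) := by unfold Spec_get_number_of_repeated_rows; infer_instance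

-- ===== CLAIM (what is proved, stated in full; the proofs are below) =====
def Claim_equal_get_number_of_repeated_rows : Prop := ∀ (matrix : List (List Int)), Dom_get_number_of_repeated_rows matrix → Pre_get_number_of_repeated_rows matrix → Spec_get_number_of_repeated_rows matrix (get_number_of_repeated_rows matrix)

-- ===== LEMMAS AND PROOFS =====

theorem pvA_inner_char (row : List Int) : ∀ (m j : Nat) (record : PySem.Dict Int Int),
    pvA_inner row (j + m) j record =
      if ((List.range' j m).map (fun k => row.getD k 0)).Nodup ∧
          ∀ k ∈ List.range' j m, record.contains (row.getD k 0) = false then 0 else 1 := by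
  intro m
  induction m with
  | zero => intro j record; rw [pvA_inner]; simp
  | succ m ih =>
    intro j record
    rw [pvA_inner]
    have hj : j < j + (m + 1) := by omega
    simp only [hj, if_true]
    by_cases hc : record.contains (row.getD j 0) = false
    · simp only [hc, if_true]
      have : j + (m + 1) = (j + 1) + m := by omega
      rw [this, ih (j + 1) (record.insert (row.getD j 0) (row.getD j 0))]
      have hcond : (((List.range' (j+1) m).map (fun k => row.getD k 0)).Nodup ∧
          ∀ k ∈ List.range' (j+1) m,
            (record.insert (row.getD j 0) (row.getD j 0)).contains (row.getD k 0) = false) ↔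
          (((List.range' j (m+1)).map (fun k => row.getD k 0)).Nodup ∧
          ∀ k ∈ List.range' j (m+1), record.contains (row.getD k 0) = false) := by
        simp only [List.range'_succ, List.map_cons, List.nodup_cons, List.mem_cons,
          List.mem_map, PySem.Dict.contains_insert, Bool.or_eq_false_iff, beq_eq_false_iff_ne]
        constructor
        · rintro ⟨hnd, hall⟩
          refine ⟨⟨?_, hnd⟩, ?_⟩
          · rintro ⟨k, hk, he⟩; exact (hall k hk).1 he
          · rintro k (rfl | hk)
            · exact hc
            · exact (hall k hk).2
        · rintro ⟨⟨hnotin, hnd⟩, hall⟩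
          refine ⟨hnd, fun k hk => ⟨?_, hall k (Or.inr hk)⟩⟩
          intro he; exact hnotin ⟨k, hk, he⟩
      rw [if_congr hcond rfl rfl]
    · rw [if_neg (by simp at hc ⊢; simp [hc])]
      have : ¬ (((List.range' j (m+1)).map (fun k => row.getD k 0)).Nodup ∧
          ∀ k ∈ List.range' j (m+1), record.contains (row.getD k 0) = false) := by
        rintro ⟨-, hall⟩
        have := hall j (by simp [List.range'_succ])
        exact hc this
      exact (if_neg this).symm

theorem pvHasAdjDup_iff (s : List Int) (h : s.Pairwise (· ≤ ·)) :
    pvHasAdjDup s = true ↔ ¬ s.Nodup := by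
  induction s with
  | nil => simp [pvHasAdjDup]
  | cons a t ih =>
    match t with
    | [] => simp [pvHasAdjDup]
    | b :: t' =>
      have hpt : (b :: t').Pairwise (· ≤ ·) := h.of_cons
      by_cases hab : a = b
      · subst hab
        constructor
        · intro _; simp
        · intro _; simp [pvHasAdjDup]
      · have hle : a ≤ b := (List.pairwise_cons.mp h).1 b (by simp)
        have hnotin : a ∉ b :: t' := by
          intro hmem
          rcases List.mem_cons.mp hmem with heq | hmem
          · exact hab heq
          · have : b ≤ a := (List.pairwise_cons.mp hpt).1 a hmem
            exact hab (le_antisymm hle this)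
        have : pvHasAdjDup (a :: b :: t') = pvHasAdjDup (b :: t') := by
          simp [pvHasAdjDup, hab]
        rw [this, ih hpt]
        simp [List.nodup_cons, hnotin]

theorem pvMap_range_getD (row : List Int) (n : Nat) (h : n ≤ row.length) :
    (List.range n).map (fun k => row.getD k 0) = row.take n := by
  apply List.ext_getElem
  · simp [h]
  · intro i h1 h2
    simp at h1
    simp [List.getElem_take, List.getD_eq_getElem?_getD, List.getElem?_eq_getElem (by omega : i < row.length)]

theorem pvRow_agree (row : List Int) (dim : Nat)
    (h : dim ≤ row.length ∨ ¬ (row.take dim).Nodup) :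
    pvA_inner row dim 0 PySem.Dict.empty =
      if pvHasAdjDup (PySem.List.sorted (row.take dim) (fun x => x) false) then 1 else 0 := by
  have h1 := pvA_inner_char row dim 0 PySem.Dict.empty
  rw [Nat.zero_add] at h1
  simp only [PySem.Dict.contains_empty, implies_true, and_true] at h1
  have hperm := PySem.List.sorted_perm (xs := row.take dim) (key := fun x => x) (rev := false)
  have hpair := PySem.List.sorted_pairwise (xs := row.take dim) (key := fun x => x)
  have hiff := pvHasAdjDup_iff _ hpair
  have hnds : (PySem.List.sorted (row.take dim) (fun x => x) false).Nodup ↔ (row.take dim).Nodup :=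
    hperm.nodup_iff
  have hL : ((List.range' 0 dim).map (fun k => row.getD k 0)).Nodup ↔ (row.take dim).Nodup := by
    rw [← List.range_eq_range']
    by_cases hle : dim ≤ row.length
    · rw [pvMap_range_getD row dim hle]
    · have hlen : row.length ≤ dim := by omega
      have hrow : row.take dim = row := List.take_of_length_le hlen
      rcases h with h' | hnd
      · omega
      · rw [hrow] at hnd ⊢
        have htk : ((List.range dim).map (fun k => row.getD k 0)).take row.length = row := by
          rw [← List.map_take, List.take_range, min_eq_left hlen,
            pvMap_range_getD row row.length (le_refl _), List.take_of_length_le (le_refl _)]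
        exact iff_of_false (fun hN => hnd (htk ▸ hN.sublist (List.take_sublist _ _))) (fun hN => absurd hN hnd)
  rw [h1]
  by_cases hnd : (row.take dim).Nodup
  · rw [if_pos (hL.mpr hnd)]
    have : pvHasAdjDup (PySem.List.sorted (row.take dim) (fun x => x) false) = false := by
      rcases Bool.eq_false_or_eq_true (pvHasAdjDup _) with ht | hf
      · exact absurd (hiff.mp ht) (fun hc => hc (hnds.mpr hnd))
      · exact hf
    rw [this]; simp
  · rw [if_neg (fun hN => hnd (hL.mp hN))]
    have : pvHasAdjDup (PySem.List.sorted (row.take dim) (fun x => x) false) = true :=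
      hiff.mpr (fun hN => hnd (hnds.mp hN))
    rw [this]; simp

theorem pvFoldl_range_getD (g : List Int → Int) :
    ∀ (n : Nat) (xs : List (List Int)) (c : Int), n ≤ xs.length →
    (List.range n).foldl (fun acc i => acc + g (xs.getD i [])) c =
      (xs.take n).foldl (fun acc r => acc + g r) c := by
  intro n
  induction n with
  | zero => simp
  | succ n ih =>
    intro xs c h
    rw [List.range_succ, List.foldl_append, ih xs c (by omega)]
    have ht : xs.take (n + 1) = xs.take n ++ [xs[n]'(by omega)] := by
      rw [List.take_succ]
      simp [List.getElem?_eq_getElem (show n < xs.length by omega)]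
    rw [ht, List.foldl_append]
    simp [List.getD_eq_getElem?_getD, List.getElem?_eq_getElem (show n < xs.length by omega)]

theorem pvFoldl_rows (dim : Nat) :
    ∀ (l : List (List Int)) (c : Int),
    (∀ row ∈ l, dim ≤ row.length ∨ ¬ (row.take dim).Nodup) →
    l.foldl (fun acc r => acc + pvA_inner r dim 0 PySem.Dict.empty) c =
      l.foldl (fun count row =>
        if pvHasAdjDup (PySem.List.sorted (row.take dim) (fun x => x) false)
        then count + 1 else count) c := by
  intro l
  induction l with
  | nil => simp
  | cons r t ih =>
    intro c hall
    simp only [List.foldl_cons]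
    rw [pvRow_agree r dim (hall r (by simp))]
    by_cases hd : pvHasAdjDup (PySem.List.sorted (r.take dim) (fun x => x) false) = true
    · rw [if_pos hd, if_pos hd]
      exact ih (c + 1) (fun row hr => hall row (by simp [hr]))
    · rw [if_neg hd, if_neg hd, add_zero]
      exact ih c (fun row hr => hall row (by simp [hr]))

-- ===== VERDICT (by name: the statement is the Claim_ definition above) =====
theorem get_number_of_repeated_rows_spec : Claim_equal_get_number_of_repeated_rows := by
  unfold Claim_equal_get_number_of_repeated_rows
  intro matrix _ hpre
  obtain ⟨hne, hlen, hrows⟩ := hpre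
  unfold Spec_get_number_of_repeated_rows get_number_of_repeated_rows get_number_of_repeated_rows_alt
  simp only [PySem.List.slice_to_natCast]
  rw [pvFoldl_range_getD (fun r => pvA_inner r (matrix.headD []).length 0 PySem.Dict.empty)
      (matrix.headD []).length matrix 0 hlen]
  exact pvFoldl_rows (matrix.headD []).length (matrix.take (matrix.headD []).length) 0 hrows
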